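-- pv_equiv track=rewrite | github.com/YacineCC/UNI | L1/Semestre_2/ALGO/TP3/exo.py | expo_gd
-- ===== SOURCE A (Python) =====
-- from math import log,floor
--
-- def bit(n,i):
-- 	return ((n>>(i))&1)
--
-- def expo_gd(x,k):
-- 	L = []
-- 	i = floor(log(k,2))
-- 	r = 1
-- 	while i >= 0:
--
-- 		r = r*r
-- 		L += [r]
-- 		if bit(k,i):
-- 			r = r*x
-- 			L += [r]
-- 		i = i - 1
-- 	return L
-- ===== SOURCE B (Python) =====
-- def expo_gd(x, k):
--     if k < 1:
--         raise ValueError("k must be >= 1")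
--     def rec(k):
--         if k == 1:
--             return [1, x], x
--         L, r = rec(k >> 1)
--         r = r * r
--         L.append(r)
--         if k & 1:
--             r = r * x
--             L.append(r)
--         return L, r
--     return rec(k)[0]
-- ===== Notes on version B (the rewrite author's own statement) =====
-- stated objective: simpler
-- what changed: B replaces A's floor(log2)-indexed while loop over bits with a direct divide-and-conquer recursion on k itself (rec(k>>1), then square and optionally multiply), dropping the log/floor computation and the bit() helper.
import Mathlib
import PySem

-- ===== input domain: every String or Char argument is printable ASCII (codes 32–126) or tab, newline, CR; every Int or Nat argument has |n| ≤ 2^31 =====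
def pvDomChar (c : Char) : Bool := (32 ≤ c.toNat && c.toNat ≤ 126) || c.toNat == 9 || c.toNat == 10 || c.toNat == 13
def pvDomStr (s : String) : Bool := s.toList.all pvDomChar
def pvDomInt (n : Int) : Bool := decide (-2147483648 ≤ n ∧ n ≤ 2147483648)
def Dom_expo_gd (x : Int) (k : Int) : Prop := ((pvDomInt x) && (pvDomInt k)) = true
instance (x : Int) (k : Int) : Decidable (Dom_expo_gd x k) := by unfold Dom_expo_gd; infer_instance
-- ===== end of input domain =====

-- B replaces A's floor(log2)-indexed while loop with a direct divide-and-conquer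
-- recursion on k (simpler decomposition; same asymptotic cost).

-- ===== PORT A =====
-- bit(n,i) = (n >> i) & 1; for any Python int, n >> i = n // 2**i and m & 1 = m % 2,
-- so this is exact for all ints.
def pyBit (n : Int) (i : Nat) : Int :=
  PySem.Int.mod (PySem.Int.floordiv n ((2:Int)^i)) 2

-- the while loop, i counting down; returns (L, r) at exit (A returns L)
def loopA (x k : Int) : Nat → Int → List Int → List Int × Int
  | 0, r, L =>
    let r1 := r * r
    let L1 := L ++ [r1]
    if pyBit k 0 ≠ 0 then (L1 ++ [r1 * x], r1 * x) else (L1, r1)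
  | i + 1, r, L =>
    let r1 := r * r
    let L1 := L ++ [r1]
    if pyBit k (i + 1) ≠ 0 then loopA x k i (r1 * x) (L1 ++ [r1 * x])
    else loopA x k i r1 L1

-- floor(log(k,2)) = Nat.log2 k.toNat : exact for 1 ≤ k ≤ 2^31 (the whole Dom;
-- checked against CPython's float log over that range). For k < 1 Python raises
-- ValueError (math domain error); those inputs are excluded by Pre_ below.
def expo_gd (x : Int) (k : Int) : List Int :=
  if k < 1 then [] else (loopA x k (Nat.log2 k.toNat) 1 []).1

-- ===== PORT B =====
-- rec(k): divide-and-conquer on k (k ≥ 1; the 0 case is unreachable)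
def recB (x : Int) : Nat → List Int × Int
  | 0 => ([], 1)
  | 1 => ([1, x], x)
  | n + 2 =>
    let (L, r) := recB x ((n + 2) / 2)
    let r1 := r * r
    let L1 := L ++ [r1]
    if (n + 2) % 2 = 1 then (L1 ++ [r1 * x], r1 * x) else (L1, r1)
decreasing_by omega

-- for k < 1 B raises ValueError (outside Pre_)
def expo_gd_alt (x : Int) (k : Int) : List Int :=
  if k < 1 then [] else (recB x k.toNat).1

-- ===== PRECONDITION & SPEC =====
-- Both A (math domain error in log) and B (explicit guard) raise ValueError for k < 1.
def Pre_expo_gd (x : Int) (k : Int) : Prop := 1 ≤ k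
instance (x : Int) (k : Int) : Decidable (Pre_expo_gd x k) := by unfold Pre_expo_gd; infer_instance
def pvWitness_expo_gd : Int × Int := (3, 13)

def Spec_expo_gd (x : Int) (k : Int) (out : List Int) : Prop := out = expo_gd_alt x k
instance (x : Int) (k : Int) (out : List Int) : Decidable (Spec_expo_gd x k out) := by unfold Spec_expo_gd; infer_instance

-- ===== CLAIM (what is proved, stated in full; the proofs are below) =====
def Claim_equal_expo_gd : Prop := ∀ (x : Int) (k : Int), Dom_expo_gd x k → Pre_expo_gd x k → Spec_expo_gd x k (expo_gd x k)

-- ===== LEMMAS AND PROOFS =====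

-- one final iteration of A's loop (square, append, conditional multiply)
def finStep (x : Int) (b : Int) (p : List Int × Int) : List Int × Int :=
  let r1 := p.2 * p.2
  let L1 := p.1 ++ [r1]
  if b ≠ 0 then (L1 ++ [r1 * x], r1 * x) else (L1, r1)

theorem loopA_succ (x k : Int) (i : Nat) (r : Int) (L : List Int) :
    loopA x k (i + 1) r L =
      if pyBit k (i + 1) ≠ 0 then loopA x k i (r * r * x) (L ++ [r * r] ++ [r * r * x])
      else loopA x k i (r * r) (L ++ [r * r]) := rfl

theorem pyBit_natCast (n : Nat) (i : Nat) : pyBit (n : Int) i = ((n / 2 ^ i % 2 : Nat) : Int) := by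
  unfold pyBit
  rw [show ((2:Int)^i) = ((2^i : Nat) : Int) by push_cast; ring]
  rw [PySem.Int.floordiv_natCast]
  exact_mod_cast PySem.Int.mod_natCast (n / 2 ^ i) 2

theorem pyBit_succ (n : Nat) (i : Nat) : pyBit (n : Int) (i + 1) = pyBit ((n / 2 : Nat) : Int) i := by
  rw [pyBit_natCast, pyBit_natCast, pow_succ, Nat.div_div_eq_div_mul, Nat.mul_comm]

-- the loop over n starting at index j+1 = the loop over n/2 starting at index j,
-- followed by one final step using bit 0 of n
theorem loopA_shift (x : Int) (n : Nat) (j : Nat) :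
    ∀ (r : Int) (L : List Int),
      loopA x (n : Int) (j + 1) r L =
        finStep x (pyBit (n : Int) 0) (loopA x ((n / 2 : Nat) : Int) j r L) := by
  induction j with
  | zero =>
    intro r L
    rw [loopA_succ x (n : Int) 0 r L, pyBit_succ n 0]
    simp only [loopA, finStep]
    by_cases hb : pyBit ((n / 2 : Nat) : Int) 0 ≠ 0
    · rw [if_pos hb, if_pos hb]
    · rw [if_neg hb, if_neg hb]
  | succ j ih =>
    intro r L
    rw [loopA_succ x (n : Int) (j + 1) r L, pyBit_succ n (j + 1),
      show loopA x ((n / 2 : Nat) : Int) (j + 1) r L =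
        if pyBit ((n / 2 : Nat) : Int) (j + 1) ≠ 0 then
          loopA x ((n / 2 : Nat) : Int) j (r * r * x) (L ++ [r * r] ++ [r * r * x])
        else loopA x ((n / 2 : Nat) : Int) j (r * r) (L ++ [r * r]) from rfl]
    split_ifs with hb <;> exact ih _ _

theorem log2_step (m : Nat) : Nat.log2 (m + 2) = Nat.log2 ((m + 2) / 2) + 1 := by
  rw [Nat.log2_eq_log_two, Nat.log2_eq_log_two, Nat.log_div_base]
  have h : 0 < Nat.log 2 (m + 2) := Nat.log_pos (by omega) (by omega)
  omega

theorem loopA_eq_recB (x : Int) : ∀ (n : Nat), 1 ≤ n →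
    loopA x (n : Int) (Nat.log2 n) 1 [] = ((recB x n).1, (recB x n).2) := by
  intro n
  induction n using Nat.strong_induction_on with
  | _ n ih =>
    intro hn
    match n, hn with
    | 1, _ =>
      have h1 : Nat.log2 1 = 0 := by rw [Nat.log2_eq_log_two]; exact Nat.log_one_right 2
      simp [h1, loopA, recB, show pyBit 1 0 = 1 from by decide]
    | (m + 2), _ =>
      have hdiv : 1 ≤ (m + 2) / 2 := by omega
      have hlt : (m + 2) / 2 < m + 2 := by omega
      rw [log2_step, loopA_shift, ih _ hlt hdiv]
      have hbit : pyBit ((m + 2 : Nat) : Int) 0 = (((m + 2) % 2 : Nat) : Int) := by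
        rw [pyBit_natCast]; norm_num
      show _ = ((recB x (m + 2)).1, (recB x (m + 2)).2)
      simp only [recB, finStep, hbit]
      rcases recB x ((m + 2) / 2) with ⟨L, r⟩
      by_cases h : (m + 2) % 2 = 1
      · simp [h]
      · have h0 : (m + 2) % 2 = 0 := by omega
        simp [h0]

-- ===== VERDICT (by name: the statement is the Claim_ definition above) =====
theorem expo_gd_spec : Claim_equal_expo_gd := by
  intro x k _ hk
  unfold Pre_expo_gd at hk
  unfold Spec_expo_gd expo_gd expo_gd_alt
  have hk' : ¬ k < 1 := by omega
  rw [if_neg hk', if_neg hk']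
  have hcast : ((k.toNat : Nat) : Int) = k := Int.toNat_of_nonneg (by omega)
  have h := loopA_eq_recB x k.toNat (by omega)
  rw [hcast] at h
  rw [h]
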